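-- pv_equiv track=rewrite | github.com/JACKSON-PHARM/pharmasight | pharmasight/backend/kra_certify.py | next_suffix_int_after_mod
-- ===== SOURCE A (Python) =====
-- def next_suffix_int_after_mod(high_water: int, modulus: int, residue: int) -> int:
--     n = int(high_water) + 1
--     m = int(modulus)
--     r = int(residue) % m
--     while n % m != r:
--         n += 1
--     if n > 9_999_999:
--         raise ValueError("itemCd 7-digit suffix exhausted")
--     return n
-- ===== SOURCE B (Python) =====
-- def next_suffix_int_after_mod(high_water: int, modulus: int, residue: int) -> int:
--     # Direct modular arithmetic: jump straight to the next value with the wanted residue.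
--     n = high_water + 1
--     n += (residue - n) % abs(modulus)
--     if n > 9_999_999:
--         raise ValueError("itemCd 7-digit suffix exhausted")
--     return n
-- ===== Notes on version B (the rewrite author's own statement) =====
-- stated objective: faster
-- what changed: Replaces the increment-until-residue-matches loop by a single closed-form modular jump n += (residue - n) % abs(modulus).
import Mathlib
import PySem

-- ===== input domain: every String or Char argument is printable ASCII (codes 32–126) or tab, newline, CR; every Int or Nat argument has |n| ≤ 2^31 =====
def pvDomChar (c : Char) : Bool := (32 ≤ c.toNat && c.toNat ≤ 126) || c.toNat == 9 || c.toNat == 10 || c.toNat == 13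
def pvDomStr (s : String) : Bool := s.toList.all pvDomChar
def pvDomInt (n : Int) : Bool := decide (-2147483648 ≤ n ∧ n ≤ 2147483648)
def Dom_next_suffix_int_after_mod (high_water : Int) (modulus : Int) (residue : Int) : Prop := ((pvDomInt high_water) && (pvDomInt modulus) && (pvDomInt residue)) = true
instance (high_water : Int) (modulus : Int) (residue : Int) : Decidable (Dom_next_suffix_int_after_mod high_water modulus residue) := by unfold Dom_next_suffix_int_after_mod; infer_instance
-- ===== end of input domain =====

-- B replaces A's increment-until-match loop by one closed-form modular jump (O(1) instead of O(|modulus|)).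

-- Python's floor-mod values of n and r by m agree exactly when |m| divides r - n.
-- (Needed by the port's termination proof, hence stated above it.)
theorem pymod_eq_iff (m n r : Int) (hm : m ≠ 0) :
    PySem.Int.mod n m = PySem.Int.mod r m ↔ |m| ∣ (r - n) := by
  have hn := PySem.Int.floordiv_mul_add_mod n m
  have hr := PySem.Int.floordiv_mul_add_mod r m
  rw [abs_dvd]
  constructor
  · intro h
    exact ⟨PySem.Int.floordiv r m - PySem.Int.floordiv n m, by linarith [hn, hr, h]⟩
  · intro h
    have hd : m ∣ (PySem.Int.mod r m - PySem.Int.mod n m) := by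
      obtain ⟨c, hc⟩ := h
      exact ⟨c - (PySem.Int.floordiv r m - PySem.Int.floordiv n m), by linarith⟩
    have hz : PySem.Int.mod r m - PySem.Int.mod n m = 0 := by
      rcases lt_or_gt_of_ne hm with hneg | hpos
      · have b1 := PySem.Int.mod_neg_bounds n (b := m) hneg
        have b2 := PySem.Int.mod_neg_bounds r (b := m) hneg
        have habs : |m| = -m := abs_of_neg hneg
        exact Int.eq_zero_of_abs_lt_dvd ((abs_dvd m _).mpr hd) (by rw [abs_lt]; omega)
      · have b1n := PySem.Int.mod_nonneg n hpos
        have b1l := PySem.Int.mod_lt n hpos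
        have b2n := PySem.Int.mod_nonneg r hpos
        have b2l := PySem.Int.mod_lt r hpos
        have habs : |m| = m := abs_of_pos hpos
        exact Int.eq_zero_of_abs_lt_dvd ((abs_dvd m _).mpr hd) (by rw [abs_lt]; omega)
    omega

-- Subtracting one from a value with nonzero remainder lowers its remainder by one.
theorem emod_sub_one (a M : Int) (hM : 0 < M) (h0 : a % M ≠ 0) :
    (a - 1) % M = a % M - 1 := by
  have hq := Int.emod_add_ediv a M
  have hkn : 0 ≤ a % M := Int.emod_nonneg _ (ne_of_gt hM)
  have hkl : a % M < M := Int.emod_lt_of_pos _ hM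
  have e : a - 1 = (a % M - 1) + M * (a / M) := by omega
  rw [e, Int.add_mul_emod_self_left]
  exact Int.emod_eq_of_lt (by omega) (by omega)

-- One loop step shrinks the distance-to-target measure.
theorem pymod_step (m r n : Int) (hm : m ≠ 0) (hne : PySem.Int.mod n m ≠ PySem.Int.mod r m) :
    ((r - (n + 1)) % |m|).toNat < ((r - n) % |m|).toNat := by
  have hM : 0 < |m| := abs_pos.mpr hm
  have hnd : ¬ |m| ∣ (r - n) := fun h => hne ((pymod_eq_iff m n r hm).mpr h)
  have hk0 : (r - n) % |m| ≠ 0 := fun h => hnd (Int.dvd_of_emod_eq_zero h)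
  have hkn : 0 ≤ (r - n) % |m| := Int.emod_nonneg _ (ne_of_gt hM)
  have e : r - (n + 1) = (r - n) - 1 := by ring
  rw [e, emod_sub_one _ _ hM hk0]
  omega

-- ===== PORT A =====
-- A's while loop.  The extra guard conjuncts 'm ≠ 0' and 'mod r m = r' only make the
-- recursion total (they hold at the call site whenever Python does not raise); the
-- loop body is exactly A's.
def nsLoopA (m r n : Int) : Int :=
  if h : m ≠ 0 ∧ PySem.Int.mod r m = r ∧ PySem.Int.mod n m ≠ r then
    nsLoopA m r (n + 1)
  else n
termination_by ((r - n) % |m|).toNat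
decreasing_by
  exact pymod_step m r n h.1 (by rw [h.2.1]; exact h.2.2)

-- A raises ValueError when the result exceeds 9_999_999 and ZeroDivisionError when
-- modulus = 0; those inputs are excluded by Pre_ (the port just returns the loop value).
def next_suffix_int_after_mod (high_water : Int) (modulus : Int) (residue : Int) : Int :=
  nsLoopA modulus (PySem.Int.mod residue modulus) (high_water + 1)

-- ===== PORT B =====
def next_suffix_int_after_mod_alt (high_water : Int) (modulus : Int) (residue : Int) : Int :=
  let n := high_water + 1
  n + PySem.Int.mod (residue - n) |modulus|

-- ===== PRECONDITION & SPEC =====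
-- Pre_ excludes exactly the inputs where the Python A raises: modulus = 0
-- (ZeroDivisionError) and inputs whose next matching value exceeds 9_999_999
-- (ValueError); B raises the same exceptions there.
def Pre_next_suffix_int_after_mod (high_water : Int) (modulus : Int) (residue : Int) : Prop :=
  modulus ≠ 0 ∧
  high_water + 1 + PySem.Int.mod (residue - (high_water + 1)) |modulus| ≤ 9999999
instance (high_water : Int) (modulus : Int) (residue : Int) : Decidable (Pre_next_suffix_int_after_mod high_water modulus residue) := by unfold Pre_next_suffix_int_after_mod; infer_instance

def pvWitness_next_suffix_int_after_mod : Int × Int × Int := (100, 7, 3)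

def Spec_next_suffix_int_after_mod (high_water : Int) (modulus : Int) (residue : Int) (out : Int) : Prop := out = next_suffix_int_after_mod_alt high_water modulus residue
instance (high_water : Int) (modulus : Int) (residue : Int) (out : Int) : Decidable (Spec_next_suffix_int_after_mod high_water modulus residue out) := by unfold Spec_next_suffix_int_after_mod; infer_instance

-- ===== CLAIM (what is proved, stated in full; the proofs are below) =====
def Claim_equal_next_suffix_int_after_mod : Prop := ∀ (high_water : Int) (modulus : Int) (residue : Int), Dom_next_suffix_int_after_mod high_water modulus residue → Pre_next_suffix_int_after_mod high_water modulus residue → Spec_next_suffix_int_after_mod high_water modulus residue (next_suffix_int_after_mod high_water modulus residue)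

-- ===== LEMMAS AND PROOFS =====

-- Closed form of A's loop: it adds exactly the forward distance to the target residue.
theorem nsLoopA_eq (m r n : Int) (hm : m ≠ 0) (hr : PySem.Int.mod r m = r) :
    nsLoopA m r n = n + (r - n) % |m| := by
  fun_induction nsLoopA m r n with
  | case1 n h ih =>
    have hM : 0 < |m| := abs_pos.mpr h.1
    have hne : PySem.Int.mod n m ≠ PySem.Int.mod r m := by rw [h.2.1]; exact h.2.2
    have hnd : ¬ |m| ∣ (r - n) := fun hd => hne ((pymod_eq_iff m n r h.1).mpr hd)
    have hk0 : (r - n) % |m| ≠ 0 := fun hz => hnd (Int.dvd_of_emod_eq_zero hz)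
    have e : (r - (n + 1)) % |m| = (r - n) % |m| - 1 := by
      have e' : r - (n + 1) = (r - n) - 1 := by ring
      rw [e', emod_sub_one _ _ hM hk0]
    rw [ih, e]; ring
  | case2 n h =>
    have heq : PySem.Int.mod n m = r := by
      by_contra hne
      exact h ⟨hm, hr, hne⟩
    have hd : |m| ∣ (r - n) := (pymod_eq_iff m n r hm).mp (heq.trans hr.symm)
    rw [Int.emod_eq_zero_of_dvd hd]; ring

-- ===== VERDICT (by name: the statement is the Claim_ definition above) =====
theorem next_suffix_int_after_mod_spec : Claim_equal_next_suffix_int_after_mod := by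
  intro hw m res _ hpre
  obtain ⟨hm, -⟩ := hpre
  have hM : 0 < |m| := abs_pos.mpr hm
  -- the reduced residue is a fixed point of mod: |m| divides res - mod res m
  have hdiv : |m| ∣ (res - PySem.Int.mod res m) := by
    rw [abs_dvd]
    exact ⟨PySem.Int.floordiv res m, by
      have := PySem.Int.floordiv_mul_add_mod res m; linarith⟩
  have hr : PySem.Int.mod (PySem.Int.mod res m) m = PySem.Int.mod res m :=
    (pymod_eq_iff m (PySem.Int.mod res m) res hm).mpr hdiv
  show next_suffix_int_after_mod hw m res
      = hw + 1 + PySem.Int.mod (res - (hw + 1)) |m|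
  unfold next_suffix_int_after_mod
  rw [nsLoopA_eq m _ _ hm hr, PySem.Int.mod_eq_emod_of_pos hM]
  obtain ⟨c, hc⟩ := hdiv
  have e : res - (hw + 1) = (PySem.Int.mod res m - (hw + 1)) + |m| * c := by linarith
  rw [e, Int.add_mul_emod_self_left]
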